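-- pv_equiv track=rewrite | github.com/drambaut/scraping_diario_oficial | src/pdf_analyzer.py | process_two_column_text
-- ===== SOURCE A (Python) =====
-- def process_two_column_text(text):
--     """
--     Procesa el texto de un PDF con formato de dos columnas.
--
--     Args:
--         text (str): Texto extraído del PDF
--
--     Returns:
--         str: Texto procesado y ordenado
--     """
--     # Dividir el texto en líneas
--     lines = text.split('\n')
--     processed_lines = []
--     current_line = []
--
--     for line in lines:
--         line = line.strip()
--         if not line:
--             continue
--
--         # Si la línea termina con guión, es parte de una palabra dividida
--         if line.endswith('-'):
--             current_line.append(line[:-1])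
--         else:
--             current_line.append(line)
--             # Unir la línea y agregarla a las líneas procesadas
--             processed_lines.append(' '.join(current_line))
--             current_line = []
--
--     # Agregar la última línea si existe
--     if current_line:
--         processed_lines.append(' '.join(current_line))
--
--     return '\n'.join(processed_lines)
-- ===== SOURCE B (Python) =====
-- def process_two_column_text(text):
--     """Same result as A via staged whole-string transforms: clean the lines,
--     join them, textually replace each hyphen-newline pair with a space,
--     then trim a trailing hyphen."""
--     cleaned = [s for s in map(str.strip, text.split('\n')) if s]
--     merged = '\n'.join(cleaned).replace('-\n', ' ')
--     return merged[:-1] if merged.endswith('-') else merged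
-- ===== Notes on version B (the rewrite author's own statement) =====
-- stated objective: alternative
-- what changed: Replaces A's line-by-line loop with current_line accumulator and flush branch by staged whole-string transforms: join the cleaned lines with newlines, textually replace each hyphen-newline pair with a space via str.replace, and trim one trailing hyphen.
import Mathlib
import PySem

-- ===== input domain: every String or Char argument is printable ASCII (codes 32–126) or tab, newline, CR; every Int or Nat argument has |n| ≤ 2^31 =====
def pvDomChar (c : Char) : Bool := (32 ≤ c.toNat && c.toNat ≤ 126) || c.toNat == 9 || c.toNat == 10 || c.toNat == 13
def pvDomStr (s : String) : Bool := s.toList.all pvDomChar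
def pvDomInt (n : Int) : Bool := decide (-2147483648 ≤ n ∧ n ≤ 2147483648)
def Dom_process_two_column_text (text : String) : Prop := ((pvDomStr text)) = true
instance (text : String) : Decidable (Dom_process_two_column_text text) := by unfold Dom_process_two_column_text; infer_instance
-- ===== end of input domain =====

-- B replaces A's line-by-line loop (current_line accumulator + flush branch) by staged
-- whole-string transforms: join the cleaned lines, str.replace each hyphen-newline pair
-- with a space, trim a trailing hyphen; same result.

-- ===== PORT A =====
-- one iteration of A's loop: state = (processed_lines, current_line)
def pvStepA (st : List (List Char) × List (List Char)) (raw : List Char) :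
    List (List Char) × List (List Char) :=
  let line := PySem.Chars.strip raw
  if line = [] then st
  else if PySem.Chars.endswith line ['-'] then
    (st.1, st.2 ++ [PySem.List.slice line none (some (-1))])
  else
    (st.1 ++ [PySem.Chars.join [' '] (st.2 ++ [line])], [])

def process_two_column_text (text : String) : String :=
  let st := (PySem.Chars.splitOn text.toList ['\n']).foldl pvStepA ([], [])
  let processed := if st.2 = [] then st.1 else st.1 ++ [PySem.Chars.join [' '] st.2]
  String.ofList (PySem.Chars.join ['\n'] processed)

-- ===== PORT B =====
def process_two_column_text_alt (text : String) : String :=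
  let cleaned := ((PySem.Chars.splitOn text.toList ['\n']).map PySem.Chars.strip).filter
      (fun s => decide (s ≠ []))
  let merged := PySem.Chars.replace (PySem.Chars.join ['\n'] cleaned) ['-', '\n'] [' ']
  if PySem.Chars.endswith merged ['-'] then
    String.ofList (PySem.List.slice merged none (some (-1)))
  else String.ofList merged

-- ===== PRECONDITION & SPEC =====
def Spec_process_two_column_text (text : String) (out : String) : Prop := out = process_two_column_text_alt text
instance (text : String) (out : String) : Decidable (Spec_process_two_column_text text out) := by unfold Spec_process_two_column_text; infer_instance

-- ===== CLAIM (what is proved, stated in full; the proofs are below) =====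
def Claim_equal_process_two_column_text : Prop := ∀ (text : String), Dom_process_two_column_text text → Spec_process_two_column_text text (process_two_column_text text)

-- ===== LEMMAS AND PROOFS =====

-- A's loop restricted to the already-cleaned (stripped, nonempty) lines
def pvStep (st : List (List Char) × List (List Char)) (l : List Char) :
    List (List Char) × List (List Char) :=
  if PySem.Chars.endswith l ['-'] then (st.1, st.2 ++ [l.dropLast])
  else (st.1 ++ [PySem.Chars.join [' '] (st.2 ++ [l])], [])

def pvFinish (st : List (List Char) × List (List Char)) : List (List Char) :=
  if st.2 = [] then st.1 else st.1 ++ [PySem.Chars.join [' '] st.2]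

-- output lines of A, as a recursion over the cleaned lines with pending words c
def pvLines (c : List (List Char)) : List (List Char) → List (List Char)
  | [] => if c = [] then [] else [PySem.Chars.join [' '] c]
  | l :: rest =>
    if PySem.Chars.endswith l ['-'] then pvLines (c ++ [l.dropLast]) rest
    else PySem.Chars.join [' '] (c ++ [l]) :: pvLines [] rest

def pvPref (c : List (List Char)) : List Char := c.flatMap (fun w => w ++ [' '])

-- per-line chunk with trailing separator (proof device)
def pvChunkB (s : List Char) : List Char :=
  if PySem.Chars.endswith s ['-'] then s.dropLast ++ [' '] else s ++ ['\n']

-- B's merged string, described recursively over the cleaned lines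
def pvMrg : List (List Char) → List Char
  | [] => []
  | [l] => l
  | l :: r :: rs => pvChunkB l ++ pvMrg (r :: rs)

-- replace '-\n' → ' ' as a plain recursion
def pvRepl : List Char → List Char
  | [] => []
  | [c] => [c]
  | c1 :: c2 :: t => if c1 = '-' ∧ c2 = '\n' then ' ' :: pvRepl t else c1 :: pvRepl (c2 :: t)

-- split on '\n' as a plain recursion
def pvSplit (cur : List Char) : List Char → List (List Char)
  | [] => [cur]
  | c :: t => if c = '\n' then cur :: pvSplit [] t else pvSplit (cur ++ [c]) t

lemma pvJoinCons (sep p : List Char) (rest : List (List Char)) (h : rest ≠ []) :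
    PySem.Chars.join sep (p :: rest) = p ++ sep ++ PySem.Chars.join sep rest := by
  cases rest with
  | nil => exact absurd rfl h
  | cons q r => exact PySem.Chars.join_cons_cons sep p q r

lemma pvFoldRaw (ls : List (List Char)) (st : List (List Char) × List (List Char)) :
    ls.foldl pvStepA st
      = ((ls.map PySem.Chars.strip).filter (fun s => decide (s ≠ []))).foldl pvStep st := by
  induction ls generalizing st with
  | nil => rfl
  | cons raw ls ih =>
    by_cases h : PySem.Chars.strip raw = []
    · simp [List.foldl, pvStepA, h, ih]
    · have h1 : pvStepA st raw = pvStep st (PySem.Chars.strip raw) := by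
        simp [pvStepA, pvStep, h, PySem.List.slice_to_neg_one]
      simp [List.foldl, h, ih, h1]

lemma pvFoldLines (cleaned : List (List Char)) (st : List (List Char) × List (List Char)) :
    pvFinish (cleaned.foldl pvStep st) = st.1 ++ pvLines st.2 cleaned := by
  induction cleaned generalizing st with
  | nil =>
    simp only [List.foldl, pvFinish, pvLines]
    split <;> simp_all
  | cons l rest ih =>
    by_cases h : PySem.Chars.endswith l ['-'] = true
    · simp [List.foldl, pvStep, h, ih, pvLines]
    · simp [List.foldl, pvStep, h, ih, pvLines]

lemma pvLines_ne_nil (cleaned c : List (List Char)) (h : c ≠ [] ∨ cleaned ≠ []) :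
    pvLines c cleaned ≠ [] := by
  induction cleaned generalizing c with
  | nil =>
    rcases h with h | h
    · simp [pvLines, h]
    · exact absurd rfl h
  | cons l rest ih =>
    by_cases hh : PySem.Chars.endswith l ['-'] = true
    · simpa [pvLines, hh] using ih (c ++ [l.dropLast]) (Or.inl (by simp))
    · simp [pvLines, hh]

lemma pvPref_join (c : List (List Char)) (l : List Char) :
    PySem.Chars.join [' '] (c ++ [l]) = pvPref c ++ l := by
  induction c with
  | nil => simp [pvPref, PySem.Chars.join_singleton]
  | cons w c ih =>
    rw [List.cons_append, pvJoinCons _ _ _ (by simp)]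
    simp [pvPref, ih]

lemma pvPref_dropLast (c : List (List Char)) :
    (pvPref c).dropLast = PySem.Chars.join [' '] c := by
  induction c with
  | nil => simp [pvPref, PySem.Chars.join_nil]
  | cons w c ih =>
    cases c with
    | nil => simp [pvPref, PySem.Chars.join_singleton]
    | cons w2 c2 =>
      have hne : pvPref (w2 :: c2) ≠ [] := by simp [pvPref]
      rw [pvJoinCons _ _ _ (by simp)]
      show ((w ++ [' ']) ++ pvPref (w2 :: c2)).dropLast = _
      rw [List.dropLast_append_of_ne_nil hne, ih]

lemma pvChunkB_ne_nil (s : List Char) : pvChunkB s ≠ [] := by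
  unfold pvChunkB; split <;> simp

lemma pvFlat_ne_nil (cleaned : List (List Char)) (h : cleaned ≠ []) :
    (cleaned.map pvChunkB).flatten ≠ [] := by
  cases cleaned with
  | nil => exact absurd rfl h
  | cons l rest => simp [pvChunkB_ne_nil l]

lemma pvMain (cleaned : List (List Char)) : ∀ (c : List (List Char)),
    PySem.Chars.join ['\n'] (pvLines c cleaned)
      = (pvPref c ++ (cleaned.map pvChunkB).flatten).dropLast := by
  induction cleaned with
  | nil =>
    intro c
    by_cases h : c = []
    · simp [pvLines, h, PySem.Chars.join_nil, pvPref]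
    · rw [show pvLines c [] = [PySem.Chars.join [' '] c] by simp [pvLines, h]]
      rw [PySem.Chars.join_singleton]
      simp [pvPref_dropLast]
  | cons l rest ih =>
    intro c
    by_cases hh : PySem.Chars.endswith l ['-'] = true
    · rw [show pvLines c (l :: rest) = pvLines (c ++ [l.dropLast]) rest by simp [pvLines, hh],
        ih]
      simp [pvPref, pvChunkB, hh]
    · rw [show pvLines c (l :: rest)
          = PySem.Chars.join [' '] (c ++ [l]) :: pvLines [] rest by simp [pvLines, hh]]
      cases rest with
      | nil =>
        rw [show pvLines ([] : List (List Char)) [] = [] from rfl]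
        rw [PySem.Chars.join_singleton, pvPref_join]
        simp only [List.map_cons, List.map_nil, List.flatten_cons, List.flatten_nil]
        rw [show pvChunkB l = l ++ ['\n'] from by simp [pvChunkB, hh]]
        simp [← List.append_assoc]
      | cons r rs =>
        rw [pvJoinCons _ _ _ (pvLines_ne_nil (r :: rs) [] (Or.inr (by simp)))]
        rw [ih []]
        have hfl := pvFlat_ne_nil (r :: rs) (by simp)
        rw [show pvPref [] = ([] : List Char) from rfl, List.nil_append]
        rw [pvPref_join]
        simp only [List.map_cons, List.flatten_cons]
        rw [show pvChunkB l = l ++ ['\n'] from by simp [pvChunkB, hh]]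
        rw [show pvChunkB r ++ (List.map pvChunkB rs).flatten
              = (List.map pvChunkB (r :: rs)).flatten from by simp]
        rw [← List.append_assoc, ← List.append_assoc, List.dropLast_append_of_ne_nil hfl]

-- splitOn.go computes pvSplit
lemma pvSplitGo (fuel : Nat) : ∀ (l cur : List Char) (acc : List (List Char)),
    l.length ≤ fuel →
    PySem.Chars.splitOn.go ['\n'] fuel l cur acc = acc.reverse ++ pvSplit cur.reverse l := by
  induction fuel with
  | zero =>
    intro l cur acc hl
    have : l = [] := by cases l <;> simp_all
    subst this
    simp [PySem.Chars.splitOn.go, pvSplit]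
  | succ fuel ih =>
    intro l cur acc hl
    cases l with
    | nil => simp [PySem.Chars.splitOn.go, pvSplit]
    | cons c t =>
      by_cases hc : c = '\n'
      · subst hc
        have hpre : List.isPrefixOf ['\n'] ('\n' :: t) = true := by simp [List.isPrefixOf]
        simp only [PySem.Chars.splitOn.go, hpre, if_true]
        rw [show List.drop ((['\n'] : List Char).length) ('\n' :: t) = t from rfl]
        rw [ih t [] ((cur.reverse) :: acc) (by simpa using Nat.le_of_succ_le_succ hl)]
        simp [pvSplit]
      · have hpre : List.isPrefixOf ['\n'] (c :: t) = false := by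
          simp only [List.isPrefixOf, List.isPrefixOf_nil_left, Bool.and_true, beq_iff_eq]
          exact beq_eq_false_iff_ne.mpr (fun h => hc h.symm)
        simp only [PySem.Chars.splitOn.go, hpre, Bool.false_eq_true, if_false]
        rw [ih t (c :: cur) acc (by simpa using Nat.le_of_succ_le_succ hl)]
        simp [pvSplit, hc]

lemma pvSplit_no_nl (l : List Char) : ∀ (cur : List Char), '\n' ∉ cur →
    ∀ p ∈ pvSplit cur l, '\n' ∉ p := by
  induction l with
  | nil => intro cur hc p hp; simp [pvSplit] at hp; subst hp; exact hc
  | cons c t ih =>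
    intro cur hc p hp
    by_cases h : c = '\n'
    · subst h
      rw [show pvSplit cur ('\n' :: t) = cur :: pvSplit [] t from by simp [pvSplit]] at hp
      rcases List.mem_cons.mp hp with hp | hp
      · subst hp; exact hc
      · exact ih [] (by simp) p hp
    · rw [show pvSplit cur (c :: t) = pvSplit (cur ++ [c]) t from by simp [pvSplit, h]] at hp
      exact ih (cur ++ [c]) (by simp [hc, Ne.symm h]) p hp

lemma pvSplitOn_no_nl (s : List Char) :
    ∀ p ∈ PySem.Chars.splitOn s ['\n'], '\n' ∉ p := by
  intro p hp
  rw [show PySem.Chars.splitOn s ['\n']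
      = PySem.Chars.splitOn.go ['\n'] (s.length + 1) s [] [] from rfl,
    pvSplitGo (s.length + 1) s [] [] (by omega)] at hp
  exact pvSplit_no_nl s [] (by simp) p (by simpa using hp)

lemma pvStrip_mem (l : List Char) (c : Char) (h : c ∈ PySem.Chars.strip l) : c ∈ l := by
  simp only [PySem.Chars.strip, PySem.Chars.rstrip, PySem.Chars.lstrip, List.mem_reverse] at h
  have h1 := (List.dropWhile_sublist (l := (List.dropWhile PySem.Chars.isspace l).reverse)
      (p := PySem.Chars.isspace)).mem h
  rw [List.mem_reverse] at h1
  exact (List.dropWhile_sublist (l := l) (p := PySem.Chars.isspace)).mem h1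

-- replace.go computes pvRepl
lemma pvRepl_cons (c : Char) (t : List Char)
    (h : c ≠ '-' ∨ t.head? ≠ some '\n') : pvRepl (c :: t) = c :: pvRepl t := by
  cases t with
  | nil => rfl
  | cons c2 t2 =>
    have hc : ¬(c = '-' ∧ c2 = '\n') := by
      rcases h with h | h
      · tauto
      · simp only [List.head?_cons, ne_eq, Option.some.injEq] at h; tauto
    simp only [pvRepl, if_neg hc]

lemma pvRepl_hyphen (t : List Char) : pvRepl ('-' :: '\n' :: t) = ' ' :: pvRepl t := by
  simp [pvRepl]

lemma pvReplGo (fuel : Nat) : ∀ (l acc : List Char), l.length ≤ fuel →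
    PySem.Chars.replace.go ['-', '\n'] [' '] fuel l acc = acc.reverse ++ pvRepl l := by
  induction fuel with
  | zero =>
    intro l acc hl
    have : l = [] := by cases l <;> simp_all
    subst this
    simp [PySem.Chars.replace.go, pvRepl]
  | succ fuel ih =>
    intro l acc hl
    cases l with
    | nil => simp [PySem.Chars.replace.go, pvRepl]
    | cons c t =>
      by_cases hpre : List.isPrefixOf ['-', '\n'] (c :: t) = true
      · obtain ⟨hc, t', ht⟩ : c = '-' ∧ ∃ t', t = '\n' :: t' := by
          cases t with
          | nil => simp [List.isPrefixOf] at hpre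
          | cons c2 t2 =>
            simp only [List.isPrefixOf, Bool.and_eq_true, beq_iff_eq,
              List.isPrefixOf_nil_left, and_true] at hpre
            exact ⟨hpre.1.symm, t2, by simp [hpre.2.symm]⟩
        subst hc; subst ht
        simp only [PySem.Chars.replace.go, hpre, if_true]
        rw [show List.drop ((['-', '\n'] : List Char).length) ('-' :: '\n' :: t') = t' from rfl]
        rw [ih t' ([' '].reverse ++ acc) (by simp at hl; omega)]
        simp [pvRepl_hyphen]
      · have hstep : pvRepl (c :: t) = c :: pvRepl t := by
          apply pvRepl_cons
          cases t with
          | nil => simp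
          | cons c2 t2 =>
            simp only [List.isPrefixOf, Bool.and_eq_true, beq_iff_eq,
              List.isPrefixOf_nil_left, and_true, not_and] at hpre
            by_cases hc : c = '-'
            · right
              simp only [List.head?_cons, ne_eq, Option.some.injEq]
              exact fun h => hpre hc.symm h.symm
            · exact Or.inl hc
        simp only [PySem.Chars.replace.go]
        rw [if_neg (by simp [hpre])]
        rw [ih t (c :: acc) (by simp at hl; omega)]
        simp [hstep]

lemma pvRepl_fix (l : List Char) (h : '\n' ∉ l) : pvRepl l = l := by
  induction l with
  | nil => rfl
  | cons c t ih =>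
    have hh : c ≠ '-' ∨ t.head? ≠ some '\n' := by
      right
      cases t with
      | nil => simp
      | cons c2 t2 =>
        simp only [List.head?_cons, ne_eq, Option.some.injEq]
        intro hc2; exact h (by simp [hc2])
    rw [pvRepl_cons c t hh, ih (by intro hm; exact h (by simp [hm]))]

lemma pvEnds_cons (c : Char) (t : List Char) (h : t ≠ []) :
    PySem.Chars.endswith (c :: t) ['-'] = PySem.Chars.endswith t ['-'] := by
  by_cases hs : PySem.Chars.endswith t ['-'] = true
  · rw [hs]
    rw [PySem.Chars.endswith_iff] at hs ⊢
    exact hs.trans (List.suffix_cons c t)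
  · rw [Bool.eq_false_iff.mpr hs, Bool.eq_false_iff]
    intro hc
    rw [PySem.Chars.endswith_iff] at hc
    rcases (List.suffix_cons_iff).mp hc with h1 | h1
    · exact h (by cases t <;> simp_all)
    · exact hs ((PySem.Chars.endswith_iff _ _).mpr h1)

lemma pvEnds_append (x y : List Char) (h : y ≠ []) :
    PySem.Chars.endswith (x ++ y) ['-'] = PySem.Chars.endswith y ['-'] := by
  induction x with
  | nil => simp
  | cons c x ih =>
    rw [List.cons_append, pvEnds_cons c (x ++ y) (by simp [h]), ih]

lemma pvReplLine (l : List Char) (rest : List Char) (hl : '\n' ∉ l) :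
    pvRepl (l ++ '\n' :: rest) = pvChunkB l ++ pvRepl rest := by
  induction l with
  | nil =>
    have he : PySem.Chars.endswith ([] : List Char) ['-'] = false := by decide
    simp only [List.nil_append, pvChunkB, he, Bool.false_eq_true, if_false]
    rw [pvRepl_cons '\n' rest (Or.inl (by decide))]
    simp
  | cons c t ih =>
    cases t with
    | nil =>
      by_cases hc : c = '-'
      · subst hc
        show pvRepl ('-' :: '\n' :: rest) = _
        rw [pvRepl_hyphen]
        have he : PySem.Chars.endswith ['-'] ['-'] = true := by decide
        simp [pvChunkB, he]
      · show pvRepl (c :: '\n' :: rest) = _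
        rw [pvRepl_cons c ('\n' :: rest) (Or.inl hc)]
        rw [pvRepl_cons '\n' rest (Or.inl (by decide))]
        have he : PySem.Chars.endswith [c] ['-'] = false := by
          rw [Bool.eq_false_iff]; intro hh
          rw [PySem.Chars.endswith_iff] at hh
          have h0 : ('-' : Char) = c := by
            simpa using List.IsSuffix.eq_of_length hh (by simp)
          exact hc h0.symm
        simp [pvChunkB, he]
    | cons c2 t2 =>
      have h2 : c2 ≠ '\n' := by intro hh; exact hl (by simp [hh])
      have ht : (c2 :: t2 : List Char) ≠ [] := by simp
      show pvRepl (c :: ((c2 :: t2) ++ '\n' :: rest)) = _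
      rw [pvRepl_cons c ((c2 :: t2) ++ '\n' :: rest)
        (Or.inr (by simp only [List.cons_append, List.head?_cons, ne_eq, Option.some.injEq]
                    exact h2))]
      rw [ih (by intro hh; exact hl (by simp [hh]))]
      unfold pvChunkB
      rw [pvEnds_cons c (c2 :: t2) ht]
      by_cases he : PySem.Chars.endswith (c2 :: t2) ['-'] = true
      · simp [he, List.dropLast_cons_of_ne_nil ht]
      · simp [he]

lemma pvB1 (cleaned : List (List Char)) (h : ∀ p ∈ cleaned, '\n' ∉ p) :
    pvRepl (PySem.Chars.join ['\n'] cleaned) = pvMrg cleaned := by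
  induction cleaned with
  | nil => simp [PySem.Chars.join_nil, pvRepl, pvMrg]
  | cons l rest ih =>
    cases rest with
    | nil =>
      rw [PySem.Chars.join_singleton]
      exact (pvRepl_fix l (h l (by simp))).trans rfl
    | cons r rs =>
      rw [pvJoinCons _ _ _ (by simp)]
      rw [show l ++ ['\n'] ++ PySem.Chars.join ['\n'] (r :: rs)
            = l ++ '\n' :: PySem.Chars.join ['\n'] (r :: rs) from by simp]
      rw [pvReplLine l _ (h l (by simp))]
      rw [ih (fun p hp => h p (by simp [hp]))]
      rfl

lemma pvMrg_ne_nil (cleaned : List (List Char)) (hne : cleaned ≠ [])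
    (h : ∀ p ∈ cleaned, p ≠ []) : pvMrg cleaned ≠ [] := by
  cases cleaned with
  | nil => exact absurd rfl hne
  | cons l rest =>
    cases rest with
    | nil => exact h l (by simp)
    | cons r rs =>
      show pvChunkB l ++ pvMrg (r :: rs) ≠ []
      simp [pvChunkB_ne_nil l]

lemma pvCond (cleaned : List (List Char)) (h : ∀ p ∈ cleaned, p ≠ []) :
    (if PySem.Chars.endswith (pvMrg cleaned) ['-'] then (pvMrg cleaned).dropLast
     else pvMrg cleaned) = ((cleaned.map pvChunkB).flatten).dropLast := by
  induction cleaned with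
  | nil => simp [pvMrg]
  | cons l rest ih =>
    cases rest with
    | nil =>
      show (if PySem.Chars.endswith l ['-'] then l.dropLast else l)
          = ((pvChunkB l ++ List.flatten []).dropLast)
      unfold pvChunkB
      by_cases he : PySem.Chars.endswith l ['-'] = true
      · simp [he]
      · simp [he]
    | cons r rs =>
      have hmne : pvMrg (r :: rs) ≠ [] :=
        pvMrg_ne_nil (r :: rs) (by simp) (fun p hp => h p (by simp [hp]))
      have hfl : ((r :: rs).map pvChunkB).flatten ≠ [] := pvFlat_ne_nil (r :: rs) (by simp)
      show (if PySem.Chars.endswith (pvChunkB l ++ pvMrg (r :: rs)) ['-'] then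
              (pvChunkB l ++ pvMrg (r :: rs)).dropLast
            else pvChunkB l ++ pvMrg (r :: rs))
          = ((pvChunkB l ++ ((r :: rs).map pvChunkB).flatten).dropLast)
      rw [pvEnds_append _ _ hmne, List.dropLast_append_of_ne_nil hmne,
        List.dropLast_append_of_ne_nil hfl]
      by_cases he : PySem.Chars.endswith (pvMrg (r :: rs)) ['-'] = true
      · rw [if_pos he]
        rw [show (if PySem.Chars.endswith (pvMrg (r :: rs)) ['-'] then (pvMrg (r :: rs)).dropLast
              else pvMrg (r :: rs)) = (pvMrg (r :: rs)).dropLast from if_pos he] at ih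
        rw [ih (fun p hp => h p (by simp [hp]))]
      · rw [if_neg (by simp [he])]
        rw [show (if PySem.Chars.endswith (pvMrg (r :: rs)) ['-'] then (pvMrg (r :: rs)).dropLast
              else pvMrg (r :: rs)) = pvMrg (r :: rs) from if_neg (by simp [he])] at ih
        rw [ih (fun p hp => h p (by simp [hp]))]

-- ===== VERDICT (by name: the statement is the Claim_ definition above) =====
theorem process_two_column_text_spec : Claim_equal_process_two_column_text := by
  intro text _
  show String.ofList (PySem.Chars.join ['\n']
        (pvFinish ((PySem.Chars.splitOn text.toList ['\n']).foldl pvStepA ([], []))))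
      = process_two_column_text_alt text
  set cleaned := (((PySem.Chars.splitOn text.toList ['\n']).map PySem.Chars.strip).filter
      (fun s => decide (s ≠ []))) with hcl
  have hne : ∀ p ∈ cleaned, p ≠ [] := by
    intro p hp
    rw [hcl, List.mem_filter] at hp
    simpa using hp.2
  have hnl : ∀ p ∈ cleaned, '\n' ∉ p := by
    intro p hp
    rw [hcl, List.mem_filter, List.mem_map] at hp
    obtain ⟨⟨q, hq, hqp⟩, _⟩ := hp
    intro hmem
    exact pvSplitOn_no_nl text.toList q hq (pvStrip_mem q '\n' (hqp ▸ hmem))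
  have hA : PySem.Chars.join ['\n']
        (pvFinish ((PySem.Chars.splitOn text.toList ['\n']).foldl pvStepA ([], [])))
      = ((cleaned.map pvChunkB).flatten).dropLast := by
    rw [pvFoldRaw, ← hcl, pvFoldLines, List.nil_append, pvMain]
    simp [pvPref]
  have hB : PySem.Chars.replace (PySem.Chars.join ['\n'] cleaned) ['-', '\n'] [' ']
      = pvMrg cleaned := by
    rw [show PySem.Chars.replace (PySem.Chars.join ['\n'] cleaned) ['-', '\n'] [' ']
        = PySem.Chars.replace.go ['-', '\n'] [' ']
            (PySem.Chars.join ['\n'] cleaned).length (PySem.Chars.join ['\n'] cleaned) []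
      from by simp [PySem.Chars.replace]]
    rw [pvReplGo _ _ [] (le_refl _), List.reverse_nil, List.nil_append]
    exact pvB1 cleaned hnl
  show _ = (if PySem.Chars.endswith
      (PySem.Chars.replace (PySem.Chars.join ['\n'] cleaned) ['-', '\n'] [' ']) ['-'] then
      String.ofList (PySem.List.slice
        (PySem.Chars.replace (PySem.Chars.join ['\n'] cleaned) ['-', '\n'] [' '])
        none (some (-1)))
    else String.ofList (PySem.Chars.replace (PySem.Chars.join ['\n'] cleaned) ['-', '\n'] [' ']))
  rw [hA, hB, PySem.List.slice_to_neg_one]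
  rw [← pvCond cleaned hne]
  by_cases he : PySem.Chars.endswith (pvMrg cleaned) ['-'] = true
  · rw [if_pos he, if_pos he]
  · rw [if_neg (by simp [he]), if_neg (by simp [he])]
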